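-- pv_equiv track=rewrite | github.com/dennisvwieringen-web/Examentrainer | src/email_sender.py | _bouw_html_tabel
-- ===== SOURCE A (Python) =====
-- def _bouw_html_tabel(rijen: list[dict]) -> str:
--     """Zet resultatenrijen om naar een gestijlde HTML-tabel."""
--     if not rijen:
--         return "<p>Nog geen gebruik geregistreerd.</p>"
--
--     # Groepeer: per leerling de eerste en laatste activiteit + aantal vragen
--     leerlingen: dict[str, dict] = {}
--     activiteiten: list[dict] = []
--
--     for rij in rijen:
--         naam      = str(rij.get("Naam", "")).strip()
--         tijdstip  = str(rij.get("Tijdstempel", ""))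
--         domein    = str(rij.get("Domein", ""))
--         if not naam:
--             continue
--         activiteiten.append({"naam": naam, "tijdstip": tijdstip, "domein": domein})
--         if naam not in leerlingen:
--             leerlingen[naam] = {"eerste": tijdstip, "laatste": tijdstip, "vragen": 0}
--         leerlingen[naam]["vragen"] += 1
--         if tijdstip > leerlingen[naam]["laatste"]:
--             leerlingen[naam]["laatste"] = tijdstip
--
--     # Tabel 1: samenvatting per leerling
--     rijen_html = ""
--     for naam, info in sorted(leerlingen.items()):
--         rijen_html += (
--             f"<tr>"
--             f"<td style='padding:8px 12px;border-bottom:1px solid #eee;'>{naam}</td>"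
--             f"<td style='padding:8px 12px;border-bottom:1px solid #eee;'>{info['eerste']}</td>"
--             f"<td style='padding:8px 12px;border-bottom:1px solid #eee;'>{info['laatste']}</td>"
--             f"<td style='padding:8px 12px;border-bottom:1px solid #eee;text-align:center;'>{info['vragen']}</td>"
--             f"</tr>"
--         )
--
--     # Tabel 2: alle sessies (laatste 30 regels, recentste eerst)
--     recente = sorted(activiteiten, key=lambda r: r["tijdstip"], reverse=True)[:30]
--     sessie_rijen = ""
--     for a in recente:
--         sessie_rijen += (
--             f"<tr>"
--             f"<td style='padding:6px 10px;border-bottom:1px solid #eee;color:#555;font-size:13px;'>{a['tijdstip']}</td>"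
--             f"<td style='padding:6px 10px;border-bottom:1px solid #eee;color:#555;font-size:13px;'>{a['naam']}</td>"
--             f"<td style='padding:6px 10px;border-bottom:1px solid #eee;color:#555;font-size:13px;'>{a['domein']}</td>"
--             f"</tr>"
--         )
--
--     return f"""
--     <h2 style='font-family:sans-serif;color:#1a1a2e;margin-bottom:4px;'>
--         Examencoach Maatschappijwetenschappen
--     </h2>
--     <p style='font-family:sans-serif;color:#555;margin-top:0;'>Overzicht leerlinggebruik</p>
--
--     <h3 style='font-family:sans-serif;color:#333;'>Per leerling</h3>
--     <table style='border-collapse:collapse;font-family:sans-serif;width:100%;max-width:600px;'>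
--       <thead>
--         <tr style='background:#1a1a2e;color:white;'>
--           <th style='padding:10px 12px;text-align:left;'>Naam</th>
--           <th style='padding:10px 12px;text-align:left;'>Eerste gebruik</th>
--           <th style='padding:10px 12px;text-align:left;'>Laatste gebruik</th>
--           <th style='padding:10px 12px;text-align:center;'>Vragen</th>
--         </tr>
--       </thead>
--       <tbody>{rijen_html}</tbody>
--     </table>
--
--     <h3 style='font-family:sans-serif;color:#333;margin-top:2em;'>Recente activiteit (max. 30)</h3>
--     <table style='border-collapse:collapse;font-family:sans-serif;width:100%;max-width:600px;'>
--       <thead>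
--         <tr style='background:#444;color:white;'>
--           <th style='padding:8px 10px;text-align:left;'>Tijdstip</th>
--           <th style='padding:8px 10px;text-align:left;'>Naam</th>
--           <th style='padding:8px 10px;text-align:left;'>Domein</th>
--         </tr>
--       </thead>
--       <tbody>{sessie_rijen}</tbody>
--     </table>
--     """
-- ===== SOURCE B (Python) =====
-- def _bouw_html_tabel(rijen: list[dict]) -> str:
--     """Zet resultatenrijen om naar een gestijlde HTML-tabel."""
--     if not rijen:
--         return "<p>Nog geen gebruik geregistreerd.</p>"
--
--     activiteiten = [
--         {"naam": naam, "tijdstip": str(rij.get("Tijdstempel", "")), "domein": str(rij.get("Domein", ""))}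
--         for rij in rijen
--         for naam in [str(rij.get("Naam", "")).strip()]
--         if naam
--     ]
--
--     # Tabel 1: per (gesorteerde, unieke) naam een scan over de activiteiten
--     def _rij1(naam):
--         groep = [a for a in activiteiten if a["naam"] == naam]
--         eerste = groep[0]["tijdstip"]
--         laatste = max(groep, key=lambda a: a["tijdstip"])["tijdstip"]
--         return (
--             f"<tr>"
--             f"<td style='padding:8px 12px;border-bottom:1px solid #eee;'>{naam}</td>"
--             f"<td style='padding:8px 12px;border-bottom:1px solid #eee;'>{eerste}</td>"
--             f"<td style='padding:8px 12px;border-bottom:1px solid #eee;'>{laatste}</td>"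
--             f"<td style='padding:8px 12px;border-bottom:1px solid #eee;text-align:center;'>{len(groep)}</td>"
--             f"</tr>"
--         )
--
--     rijen_html = "".join(_rij1(naam) for naam in sorted({a["naam"] for a in activiteiten}))
--
--     # Tabel 2: alle sessies (laatste 30 regels, recentste eerst)
--     def _rij2(a):
--         return (
--             f"<tr>"
--             f"<td style='padding:6px 10px;border-bottom:1px solid #eee;color:#555;font-size:13px;'>{a['tijdstip']}</td>"
--             f"<td style='padding:6px 10px;border-bottom:1px solid #eee;color:#555;font-size:13px;'>{a['naam']}</td>"
--             f"<td style='padding:6px 10px;border-bottom:1px solid #eee;color:#555;font-size:13px;'>{a['domein']}</td>"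
--             f"</tr>"
--         )
--
--     sessie_rijen = "".join(
--         _rij2(a)
--         for a in sorted(activiteiten, key=lambda r: r["tijdstip"], reverse=True)[:30]
--     )
--
--     return f"""
--     <h2 style='font-family:sans-serif;color:#1a1a2e;margin-bottom:4px;'>
--         Examencoach Maatschappijwetenschappen
--     </h2>
--     <p style='font-family:sans-serif;color:#555;margin-top:0;'>Overzicht leerlinggebruik</p>
--
--     <h3 style='font-family:sans-serif;color:#333;'>Per leerling</h3>
--     <table style='border-collapse:collapse;font-family:sans-serif;width:100%;max-width:600px;'>
--       <thead>
--         <tr style='background:#1a1a2e;color:white;'>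
--           <th style='padding:10px 12px;text-align:left;'>Naam</th>
--           <th style='padding:10px 12px;text-align:left;'>Eerste gebruik</th>
--           <th style='padding:10px 12px;text-align:left;'>Laatste gebruik</th>
--           <th style='padding:10px 12px;text-align:center;'>Vragen</th>
--         </tr>
--       </thead>
--       <tbody>{rijen_html}</tbody>
--     </table>
--
--     <h3 style='font-family:sans-serif;color:#333;margin-top:2em;'>Recente activiteit (max. 30)</h3>
--     <table style='border-collapse:collapse;font-family:sans-serif;width:100%;max-width:600px;'>
--       <thead>
--         <tr style='background:#444;color:white;'>
--           <th style='padding:8px 10px;text-align:left;'>Tijdstip</th>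
--           <th style='padding:8px 10px;text-align:left;'>Naam</th>
--           <th style='padding:8px 10px;text-align:left;'>Domein</th>
--         </tr>
--       </thead>
--       <tbody>{sessie_rijen}</tbody>
--     </table>
--     """
-- ===== Notes on version B (the rewrite author's own statement) =====
-- stated objective: idiomatic
-- what changed: Replaces A's single-pass dict accumulation of per-student first/last/count by a filtered comprehension plus, for each sorted distinct name, direct scans (first occurrence, max, len) over the activity list, and string += loops by ''.join over generators.
import Mathlib
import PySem

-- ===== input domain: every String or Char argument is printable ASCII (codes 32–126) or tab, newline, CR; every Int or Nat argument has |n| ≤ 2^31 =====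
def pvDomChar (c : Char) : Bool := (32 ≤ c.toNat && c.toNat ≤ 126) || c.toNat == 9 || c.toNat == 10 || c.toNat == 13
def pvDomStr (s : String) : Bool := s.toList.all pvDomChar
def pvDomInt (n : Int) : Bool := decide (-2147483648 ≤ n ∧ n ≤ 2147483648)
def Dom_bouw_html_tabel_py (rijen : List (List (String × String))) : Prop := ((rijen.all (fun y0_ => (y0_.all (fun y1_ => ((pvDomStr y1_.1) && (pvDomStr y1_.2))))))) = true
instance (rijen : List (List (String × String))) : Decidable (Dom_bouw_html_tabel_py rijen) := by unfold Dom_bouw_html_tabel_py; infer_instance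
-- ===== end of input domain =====

-- B replaces A's single-pass dict accumulation by a filtered list plus, per sorted distinct
-- name, direct scans (first / max / count) over it ("idiomatic"; not faster).
-- Shared HTML formatting helpers (the literal f-string text both Pythons contain verbatim):

def pvCell1 (s : String) : String :=
  "<td style='padding:8px 12px;border-bottom:1px solid #eee;'>" ++ s ++ "</td>"

def pvRow1 (naam eerste laatste : String) (vragen : Int) : String :=
  "<tr>" ++ pvCell1 naam ++ pvCell1 eerste ++ pvCell1 laatste ++
  "<td style='padding:8px 12px;border-bottom:1px solid #eee;text-align:center;'>" ++
  PySem.Int.toStr vragen ++ "</td>" ++ "</tr>"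

def pvCell2 (s : String) : String :=
  "<td style='padding:6px 10px;border-bottom:1px solid #eee;color:#555;font-size:13px;'>" ++ s ++ "</td>"

-- one row of table 2, from an activiteit (naam, tijdstip, domein)
def pvRow2 (a : String × String × String) : String :=
  "<tr>" ++ pvCell2 a.2.1 ++ pvCell2 a.1 ++ pvCell2 a.2.2 ++ "</tr>"

def pvWrapPre : String := "\n    <h2 style='font-family:sans-serif;color:#1a1a2e;margin-bottom:4px;'>\n        Examencoach Maatschappijwetenschappen\n    </h2>\n    <p style='font-family:sans-serif;color:#555;margin-top:0;'>Overzicht leerlinggebruik</p>\n\n    <h3 style='font-family:sans-serif;color:#333;'>Per leerling</h3>\n    <table style='border-collapse:collapse;font-family:sans-serif;width:100%;max-width:600px;'>\n      <thead>\n        <tr style='background:#1a1a2e;color:white;'>\n          <th style='padding:10px 12px;text-align:left;'>Naam</th>\n          <th style='padding:10px 12px;text-align:left;'>Eerste gebruik</th>\n          <th style='padding:10px 12px;text-align:left;'>Laatste gebruik</th>\n          <th style='padding:10px 12px;text-align:center;'>Vragen</th>\n        </tr>\n      </thead>\n      <tbody>"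
def pvWrapMid : String := "</tbody>\n    </table>\n\n    <h3 style='font-family:sans-serif;color:#333;margin-top:2em;'>Recente activiteit (max. 30)</h3>\n    <table style='border-collapse:collapse;font-family:sans-serif;width:100%;max-width:600px;'>\n      <thead>\n        <tr style='background:#444;color:white;'>\n          <th style='padding:8px 10px;text-align:left;'>Tijdstip</th>\n          <th style='padding:8px 10px;text-align:left;'>Naam</th>\n          <th style='padding:8px 10px;text-align:left;'>Domein</th>\n        </tr>\n      </thead>\n      <tbody>"
def pvWrapSuf : String := "</tbody>\n    </table>\n    "

-- the final f-string with the two table bodies interpolated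
def pvWrap (rijen_html sessie_rijen : String) : String :=
  pvWrapPre ++ rijen_html ++ pvWrapMid ++ sessie_rijen ++ pvWrapSuf

-- ===== PORT A =====
-- one iteration of A's loop; state = (leerlingen, activiteiten).
-- 'leerlingen[naam]' always succeeds in Python (the key was just ensured); getD's dummy
-- default ("","",0) is unreachable.
def pvA_step (st : PySem.Dict String (String × String × Int) × List (String × String × String))
    (rij : List (String × String)) :
    PySem.Dict String (String × String × Int) × List (String × String × String) :=
  let naam := PySem.Str.strip ((PySem.Dict.mk rij).getD "Naam" "")
  let tijdstip := (PySem.Dict.mk rij).getD "Tijdstempel" ""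
  let domein := (PySem.Dict.mk rij).getD "Domein" ""
  if naam = "" then st
  else
    let acts := st.2 ++ [(naam, tijdstip, domein)]
    let d := if st.1.contains naam then st.1 else st.1.insert naam (tijdstip, tijdstip, 0)
    let info := d.getD naam ("", "", 0)
    let info := (info.1, info.2.1, info.2.2 + 1)
    let info := if info.2.1 < tijdstip then (info.1, tijdstip, info.2.2) else info
    (d.insert naam info, acts)

def bouw_html_tabel_py (rijen : List (List (String × String))) : String :=
  if rijen = [] then "<p>Nog geen gebruik geregistreerd.</p>"
  else
    let st := rijen.foldl pvA_step (PySem.Dict.mk [], [])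
    -- sorted(leerlingen.items()): keys are distinct, so Python's tuple sort is sort by key
    let rijen_html :=
      (PySem.List.sorted st.1.items (fun p => p.1) false).foldl
        (fun acc p => acc ++ pvRow1 p.1 p.2.1 p.2.2.1 p.2.2.2) ""
    let recente := PySem.List.slice (PySem.List.sorted st.2 (fun a => a.2.1) true) none (some 30)
    let sessie_rijen := recente.foldl (fun acc a => acc ++ pvRow2 a) ""
    pvWrap rijen_html sessie_rijen

-- ===== PORT B =====
-- the list-comprehension filter of Source B
def pvB_extract (rij : List (String × String)) : Option (String × String × String) :=
  let naam := PySem.Str.strip ((PySem.Dict.mk rij).getD "Naam" "")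
  if naam = "" then none
  else some (naam, (PySem.Dict.mk rij).getD "Tijdstempel" "", (PySem.Dict.mk rij).getD "Domein" "")

-- Source B's _rij1: scan the activiteiten for one name. 'groep[0]' and 'max(groep, …)' always
-- succeed in Python (groep is nonempty for every naam this is called on); the defaults are unreachable.
def pvB_rij1 (acts : List (String × String × String)) (naam : String) : String :=
  let groep := acts.filter (fun a => a.1 == naam)
  let eerste := (groep.headD ("", "", "")).2.1
  let laatste := (PySem.List.maxD groep (fun a => a.2.1) ("", "", "")).2.1
  pvRow1 naam eerste laatste (groep.length : Int)

def bouw_html_tabel_py_alt (rijen : List (List (String × String))) : String :=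
  if rijen = [] then "<p>Nog geen gebruik geregistreerd.</p>"
  else
    let activiteiten := rijen.filterMap pvB_extract
    let rijen_html :=
      PySem.Str.join ""
        ((PySem.List.sorted (PySem.Set.ofList (activiteiten.map (fun a => a.1))) (fun n => n) false).map
          (pvB_rij1 activiteiten))
    let sessie_rijen :=
      PySem.Str.join ""
        ((PySem.List.slice (PySem.List.sorted activiteiten (fun a => a.2.1) true) none (some 30)).map pvRow2)
    pvWrap rijen_html sessie_rijen

-- ===== PRECONDITION & SPEC =====
def Spec_bouw_html_tabel_py (rijen : List (List (String × String))) (out : String) : Prop := out = bouw_html_tabel_py_alt rijen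
instance (rijen : List (List (String × String))) (out : String) : Decidable (Spec_bouw_html_tabel_py rijen out) := by unfold Spec_bouw_html_tabel_py; infer_instance

-- ===== CLAIM (what is proved, stated in full; the proofs are below) =====
def Claim_equal_bouw_html_tabel_py : Prop := ∀ (rijen : List (List (String × String))), Dom_bouw_html_tabel_py rijen → Spec_bouw_html_tabel_py rijen (bouw_html_tabel_py rijen)

-- ===== LEMMAS AND PROOFS =====

-- the dict-only part of A's loop body, as a fold over the kept activiteiten
def pvDictStep (d : PySem.Dict String (String × String × Int)) (a : String × String × String) :
    PySem.Dict String (String × String × Int) :=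
  let d := if d.contains a.1 then d else d.insert a.1 (a.2.1, a.2.1, 0)
  let info := d.getD a.1 ("", "", 0)
  let info := (info.1, info.2.1, info.2.2 + 1)
  let info := if info.2.1 < a.2.1 then (info.1, a.2.1, info.2.2) else info
  d.insert a.1 info

-- the per-name summary both programs compute
def pvStats (acts : List (String × String × String)) (n : String) : String × String × Int :=
  let g := acts.filter (fun a => a.1 == n)
  ((g.headD ("", "", "")).2.1, (PySem.List.maxD g (fun a => a.2.1) ("", "", "")).2.1, (g.length : Int))

lemma pvA_fold_acts (l : List (List (String × String)))
    (d : PySem.Dict String (String × String × Int)) (acc : List (String × String × String)) :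
    (l.foldl pvA_step (d, acc)).2 = acc ++ l.filterMap pvB_extract := by
  induction l generalizing d acc with
  | nil => simp
  | cons r t ih =>
    simp only [List.foldl_cons, List.filterMap_cons, pvA_step, pvB_extract]
    by_cases h : PySem.Str.strip ((PySem.Dict.mk r).getD "Naam" "") = "" <;>
      simp [h, ih] <;> rfl

lemma pvA_fold_dict (l : List (List (String × String)))
    (d : PySem.Dict String (String × String × Int)) (acc : List (String × String × String)) :
    (l.foldl pvA_step (d, acc)).1 = (l.filterMap pvB_extract).foldl pvDictStep d := by
  induction l generalizing d acc with
  | nil => simp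
  | cons r t ih =>
    simp only [List.foldl_cons, List.filterMap_cons, pvA_step, pvB_extract]
    by_cases h : PySem.Str.strip ((PySem.Dict.mk r).getD "Naam" "") = "" <;>
      simp [h, ih, pvDictStep] <;> rfl

lemma pvFind?_map {α : Type} (l : List String) (f : String → α) (m : String) (hm : m ∈ l) :
    List.find? (fun p => p.1 == m) (l.map (fun n => (n, f n))) = some (m, f m) := by
  induction l with
  | nil => simp at hm
  | cons x t ih =>
    by_cases h : x = m
    · subst h; simp
    · have hm' : m ∈ t := (List.mem_cons.mp hm).resolve_left (fun e => h e.symm)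
      simpa [List.find?_cons, h] using ih hm'

lemma pvDedup_append (xs : List String) (x : String) :
    PySem.List.dedup (xs ++ [x]) =
      if x ∈ xs then PySem.List.dedup xs else PySem.List.dedup xs ++ [x] := by
  simp only [PySem.List.dedup_eq_ofList, PySem.Set.ofList_append, PySem.Set.update_cons,
    PySem.Set.update_nil]
  simp [PySem.Set.add, PySem.Set.contains]

lemma pvStats_append_ne (l : List (String × String × String)) (a : String × String × String)
    (n : String) (h : ¬ a.1 = n) : pvStats (l ++ [a]) n = pvStats l n := by
  have hb : (a.1 == n) = false := by simp [h]
  simp [pvStats, List.filter_append, hb]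

lemma pvStats_append_fresh (l : List (String × String × String)) (a : String × String × String)
    (h : a.1 ∉ l.map (fun x => x.1)) : pvStats (l ++ [a]) a.1 = (a.2.1, a.2.1, 1) := by
  have hf : l.filter (fun x => x.1 == a.1) = [] := by
    rw [List.filter_eq_nil_iff]
    intro x hx e
    exact h (List.mem_map.mpr ⟨x, hx, eq_of_beq e⟩)
  simp [pvStats, List.filter_append, hf, PySem.List.maxD, PySem.List.max?]

lemma pvMax?_append (g : List (String × String × String)) (a : String × String × String) :
    PySem.List.max? (g ++ [a]) (fun x => x.2.1) =
      match PySem.List.max? g (fun x => x.2.1) with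
      | none => some a
      | some m => if m.2.1 < a.2.1 then some a else some m := by
  unfold PySem.List.max?
  rw [List.foldl_append]
  simp only [List.foldl_cons, List.foldl_nil]
  split <;> rename_i hsp <;> rw [hsp]

lemma pvStats_append_self (l : List (String × String × String)) (a : String × String × String)
    (h : l.filter (fun x => x.1 == a.1) ≠ []) :
    pvStats (l ++ [a]) a.1 =
      ((pvStats l a.1).1,
       if (pvStats l a.1).2.1 < a.2.1 then a.2.1 else (pvStats l a.1).2.1,
       (pvStats l a.1).2.2 + 1) := by
  obtain ⟨b, g, hg⟩ : ∃ b g, l.filter (fun x => x.1 == a.1) = b :: g := by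
    cases hl : l.filter (fun x => x.1 == a.1) with
    | nil => exact absurd hl h
    | cons b g => exact ⟨b, g, rfl⟩
  obtain ⟨m, hm⟩ : ∃ m, PySem.List.max? (b :: g) (fun x => x.2.1) = some m := by
    cases hmm : PySem.List.max? (b :: g) (fun x => x.2.1) with
    | none => simp [PySem.List.max?_eq_none_iff] at hmm
    | some m => exact ⟨m, rfl⟩
  have hmax := pvMax?_append (b :: g) a
  rw [hm] at hmax
  have hfa : (l ++ [a]).filter (fun x => x.1 == a.1) = (b :: g) ++ [a] := by
    simp [List.filter_append, hg]
  simp only [pvStats, hfa, hg, PySem.List.maxD, hmax, hm, Option.getD_some]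
  by_cases hc : m.2.1 < a.2.1 <;> simp [hc, List.length_append]

lemma pvDict_char (acts : List (String × String × String)) :
    (acts.foldl pvDictStep (PySem.Dict.mk [])).items =
      (PySem.List.dedup (acts.map (fun a => a.1))).map (fun n => (n, pvStats acts n)) := by
  induction acts using List.reverseRecOn with
  | nil => simp [PySem.List.dedup]
  | append_singleton l a ih =>
    rw [List.foldl_append, List.foldl_cons, List.foldl_nil]
    set dd := List.foldl pvDictStep (PySem.Dict.mk []) l
    have hns : (l ++ [a]).map (fun x => x.1) = l.map (fun x => x.1) ++ [a.1] := by simp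
    by_cases hmem : a.1 ∈ l.map (fun x => x.1)
    · -- existing name: the first insert is skipped, the entry is updated in place
      have hcont : dd.contains a.1 = true := by
        simp only [PySem.Dict.contains, ih, List.any_map]
        exact List.any_eq_true.mpr ⟨a.1, (PySem.List.mem_dedup _ _).mpr hmem, beq_self_eq_true a.1⟩
      have hget : dd.get? a.1 = some (pvStats l a.1) := by
        simp only [PySem.Dict.get?, ih]
        rw [pvFind?_map _ _ _ ((PySem.List.mem_dedup _ _).mpr hmem)]
        rfl
      have hfilter : l.filter (fun x => x.1 == a.1) ≠ [] := by
        obtain ⟨x, hx, hx1⟩ := List.mem_map.mp hmem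
        intro hnil
        have : x ∈ l.filter (fun x => x.1 == a.1) :=
          List.mem_filter.mpr ⟨hx, by simp [hx1]⟩
        simp [hnil] at this
      simp only [pvDictStep, hcont, if_true, PySem.Dict.getD, hget, Option.getD_some]
      have hins : (dd.insert a.1
          (if (pvStats l a.1).2.1 < a.2.1
           then ((pvStats l a.1).1, a.2.1, (pvStats l a.1).2.2 + 1)
           else ((pvStats l a.1).1, (pvStats l a.1).2.1, (pvStats l a.1).2.2 + 1))).items =
          dd.items.map (fun p => if p.1 == a.1 then (a.1,
            (if (pvStats l a.1).2.1 < a.2.1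
             then ((pvStats l a.1).1, a.2.1, (pvStats l a.1).2.2 + 1)
             else ((pvStats l a.1).1, (pvStats l a.1).2.1, (pvStats l a.1).2.2 + 1))) else p) := by
        simp [PySem.Dict.insert, hcont]
      rw [hins, ih, hns, pvDedup_append _ _, if_pos hmem, List.map_map]
      apply List.map_congr_left
      intro n hn
      by_cases hna : n = a.1
      · subst hna
        simp only [Function.comp, beq_self_eq_true, if_pos]
        rw [pvStats_append_self l a hfilter]
        by_cases hc : (pvStats l a.1).2.1 < a.2.1 <;> simp [hc]
      · have : (n == a.1) = false := by simp [hna]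
        simp only [Function.comp, this, if_neg, Bool.false_eq_true, not_false_iff]
        rw [pvStats_append_ne l a n (fun e => hna e.symm)]
    · -- fresh name: appended at the end of the dict
      have hcont : dd.contains a.1 = false := by
        simp only [PySem.Dict.contains, ih, List.any_map]
        apply List.any_eq_false.mpr
        intro n hn
        have hne : ¬ n = a.1 := by
          rintro rfl; exact hmem ((PySem.List.mem_dedup _ _).mp hn)
        simp [hne]
      simp only [pvDictStep, hcont, Bool.false_eq_true, if_false]
      rw [PySem.Dict.getD, PySem.Dict.get?_insert_self, Option.getD_some]
      simp only [lt_irrefl, if_false]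
      rw [PySem.Dict.insert_insert_self]
      have hins : (dd.insert a.1 (a.2.1, a.2.1, 0 + 1)).items =
          dd.items ++ [(a.1, (a.2.1, a.2.1, 0 + 1))] := by
        simp [PySem.Dict.insert, hcont]
      rw [hins, ih, hns, pvDedup_append _ _, if_neg hmem, List.map_append]
      congr 1
      · apply List.map_congr_left
        intro n hn
        have hn' : n ∈ l.map (fun x => x.1) := (PySem.List.mem_dedup _ _).mp hn
        have hna : ¬ a.1 = n := by rintro rfl; exact hmem hn'
        rw [pvStats_append_ne l a n hna]
      · rw [List.map_singleton, pvStats_append_fresh l a hmem]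
        norm_num

lemma pvJoin_cons (x : String) (xs : List String) :
    PySem.Str.join "" (x :: xs) = x ++ PySem.Str.join "" xs := by
  cases xs with
  | nil => simp [PySem.Str.join, PySem.Chars.join, List.intercalate]
  | cons y ys =>
    simp [PySem.Str.join, PySem.Chars.join, List.intercalate, String.ofList_append]

lemma pvFoldl_join {α : Type} (l : List α) (f : α → String) (s : String) :
    l.foldl (fun acc x => acc ++ f x) s = s ++ PySem.Str.join "" (l.map f) := by
  induction l generalizing s with
  | nil => simp [PySem.Str.join, PySem.Chars.join, List.intercalate]
  | cons x t ih =>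
    rw [List.map_cons, pvJoin_cons, List.foldl_cons, ih, String.append_assoc]

lemma pvSorted_items (acts : List (String × String × String)) :
    PySem.List.sorted ((acts.foldl pvDictStep (PySem.Dict.mk [])).items) (fun p => p.1) false =
      (PySem.List.sorted (PySem.Set.ofList (acts.map (fun a => a.1))) (fun n => n) false).map
        (fun n => (n, pvStats acts n)) := by
  apply PySem.List.sorted_eq_of_perm_of_pairwise_lt
  · rw [pvDict_char]
    apply List.Perm.map
    simpa using PySem.List.sorted_perm (PySem.Set.ofList (acts.map (fun a => a.1))) (fun n => n) false
  · have hp := PySem.List.sorted_ofList_pairwise_lt (acts.map (fun a => a.1))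
    exact hp.map _ (fun a b hab => hab)

theorem bouw_html_tabel_py_spec : Claim_equal_bouw_html_tabel_py := by
  unfold Claim_equal_bouw_html_tabel_py
  intro rijen _
  unfold Spec_bouw_html_tabel_py bouw_html_tabel_py bouw_html_tabel_py_alt
  by_cases h : rijen = []
  · simp [h]
  · simp only [h, if_false]
    have hacts := pvA_fold_acts rijen (PySem.Dict.mk []) []
    have hdict := pvA_fold_dict rijen (PySem.Dict.mk []) []
    simp only [hacts, hdict, List.nil_append]
    rw [pvSorted_items]
    rw [pvFoldl_join, pvFoldl_join]
    simp only [List.map_map, String.empty_append]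
    rfl
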